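-- pv_equiv track=rewrite | github.com/kospsh157/Youtube_fashion_replies | useModel_v3.py | classifier_category
-- ===== SOURCE A (Python) =====
-- def classifier_category(predicted_class):
--     # predicted_class 에서 분류된 것들을 인덱스 별로 분리해야 한다.
--     top_keywords = []
--     bottom_keywords = []
--     outer_keywords = []
--     shoes_keywords = []
--     accessary_keywords = []
--     not_fashion_items = []
--
--     # 0: 상의, 1: 하의, 2: 아우터, 3: 신발, 4: 악세사리, 5: 비패션아이템
--     for keyword, index in predicted_class.items():
--         if index == 0:
--             top_keywords.append(keyword)
--         elif index == 1:
--             bottom_keywords.append(keyword)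
--         elif index == 2:
--             outer_keywords.append(keyword)
--         elif index == 3:
--             shoes_keywords.append(keyword)
--         elif index == 4:
--             accessary_keywords.append(keyword)
--         else:
--             not_fashion_items.append(keyword)
--
--     return top_keywords, bottom_keywords, outer_keywords, shoes_keywords, accessary_keywords, not_fashion_items
-- ===== SOURCE B (Python) =====
-- def classifier_category(predicted_class):
--     # Six independent filter passes: one comprehension per category,
--     # stateless (no accumulators, no mutation), instead of one stateful
--     # pass that dispatches into buckets.
--     items = list(predicted_class.items())
--
--     def pick(k):
--         return [kw for kw, i in items if i == k]
--
--     others = [kw for kw, i in items if i not in (0, 1, 2, 3, 4)]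
--     return pick(0), pick(1), pick(2), pick(3), pick(4), others
-- ===== Notes on version B (the rewrite author's own statement) =====
-- stated objective: alternative
-- what changed: Replaces A's single stateful pass that appends into six named lists via an if/elif chain with six independent stateless filter passes (one comprehension per category, plus one for the catch-all), trading one O(n) pass for six O(n) filters.
import Mathlib
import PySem

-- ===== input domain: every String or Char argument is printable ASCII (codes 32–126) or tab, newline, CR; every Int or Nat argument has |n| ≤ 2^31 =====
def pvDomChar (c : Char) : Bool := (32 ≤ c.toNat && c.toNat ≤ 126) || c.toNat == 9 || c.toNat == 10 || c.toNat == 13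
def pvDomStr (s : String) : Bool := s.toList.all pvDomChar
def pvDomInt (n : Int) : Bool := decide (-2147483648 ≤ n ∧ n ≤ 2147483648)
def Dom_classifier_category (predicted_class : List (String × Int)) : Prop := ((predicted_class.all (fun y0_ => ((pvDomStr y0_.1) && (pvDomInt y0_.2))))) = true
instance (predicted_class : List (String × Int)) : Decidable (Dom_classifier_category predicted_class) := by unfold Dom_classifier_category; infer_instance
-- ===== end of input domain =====

-- B replaces A's single stateful pass with an if/elif chain by six independent stateless filter passes (alternative; same value).

-- ===== PORT A =====
-- loop over dict items carrying the six named lists as state (appends at the end, as Python's append)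
def classifier_category_loopA (items : List (String × Int))
    (st : List String × List String × List String × List String × List String × List String) :
    List String × List String × List String × List String × List String × List String :=
  match items with
  | [] => st
  | (keyword, index) :: rest =>
    let (t, b, o, s, a, n) := st
    if index = 0 then classifier_category_loopA rest (t ++ [keyword], b, o, s, a, n)
    else if index = 1 then classifier_category_loopA rest (t, b ++ [keyword], o, s, a, n)
    else if index = 2 then classifier_category_loopA rest (t, b, o ++ [keyword], s, a, n)
    else if index = 3 then classifier_category_loopA rest (t, b, o, s ++ [keyword], a, n)
    else if index = 4 then classifier_category_loopA rest (t, b, o, s, a ++ [keyword], n)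
    else classifier_category_loopA rest (t, b, o, s, a, n ++ [keyword])

def classifier_category (predicted_class : List (String × Int)) : List String × List String × List String × List String × List String × List String :=
  classifier_category_loopA predicted_class ([], [], [], [], [], [])

-- ===== PORT B =====
-- pick(k): one filter comprehension per category
def classifier_category_pick (items : List (String × Int)) (k : Int) : List String :=
  (items.filter (fun p => p.2 = k)).map (fun p => p.1)

def classifier_category_alt (predicted_class : List (String × Int)) : List String × List String × List String × List String × List String × List String :=
  let items := predicted_class
  let others := (items.filter (fun p => ¬ (p.2 = 0 ∨ p.2 = 1 ∨ p.2 = 2 ∨ p.2 = 3 ∨ p.2 = 4))).map (fun p => p.1)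
  (classifier_category_pick items 0, classifier_category_pick items 1,
   classifier_category_pick items 2, classifier_category_pick items 3,
   classifier_category_pick items 4, others)

-- ===== PRECONDITION & SPEC =====
def Spec_classifier_category (predicted_class : List (String × Int)) (out : List String × List String × List String × List String × List String × List String) : Prop := out = classifier_category_alt predicted_class
instance (predicted_class : List (String × Int)) (out : List String × List String × List String × List String × List String × List String) : Decidable (Spec_classifier_category predicted_class out) := by unfold Spec_classifier_category; infer_instance

-- ===== CLAIM =====
def Claim_equal_classifier_category : Prop := ∀ (predicted_class : List (String × Int)), Dom_classifier_category predicted_class → Spec_classifier_category predicted_class (classifier_category predicted_class)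

-- ===== LEMMAS AND PROOFS =====
-- Loop invariant: A's loop result is each accumulator followed by the corresponding filter of the remaining items.
theorem loopA_eq_filters (items : List (String × Int)) (t b o s a n : List String) :
    classifier_category_loopA items (t, b, o, s, a, n) =
      (t ++ classifier_category_pick items 0,
       b ++ classifier_category_pick items 1,
       o ++ classifier_category_pick items 2,
       s ++ classifier_category_pick items 3,
       a ++ classifier_category_pick items 4,
       n ++ (items.filter (fun p => ¬ (p.2 = 0 ∨ p.2 = 1 ∨ p.2 = 2 ∨ p.2 = 3 ∨ p.2 = 4))).map (fun p => p.1)) := by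
  induction items generalizing t b o s a n with
  | nil => simp [classifier_category_loopA, classifier_category_pick]
  | cons hd rest ih =>
    obtain ⟨kw, i⟩ := hd
    by_cases h0 : i = 0
    · simp [classifier_category_loopA, classifier_category_pick, h0, ih, List.filter]
    · by_cases h1 : i = 1
      · simp [classifier_category_loopA, classifier_category_pick, h1, ih, List.filter]
      · by_cases h2 : i = 2
        · simp [classifier_category_loopA, classifier_category_pick, h2, ih, List.filter]
        · by_cases h3 : i = 3
          · simp [classifier_category_loopA, classifier_category_pick, h3, ih, List.filter]
          · by_cases h4 : i = 4
            · simp [classifier_category_loopA, classifier_category_pick, h4, ih, List.filter]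
            · simp [classifier_category_loopA, classifier_category_pick, h0, h1, h2, h3, h4, ih, List.filter]

-- ===== VERDICT =====
theorem classifier_category_spec : Claim_equal_classifier_category := by
  intro pc _
  unfold Spec_classifier_category classifier_category classifier_category_alt
  simp [loopA_eq_filters]
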